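-- pv_equiv track=rewrite | github.com/apclemens/xword-gen | templates/graphTemplate.py | getWordLengths
-- ===== SOURCE A (Python) =====
-- def getWordLengths(template):
--
--   wordLengths = []
--
--   # across
--   for i in range(len(template)):
--     line = template[i]
--     words = line.split(' ')
--     for w in words:
--       if len(w) != 0:
--         wordLengths.append(len(w))
--
--   # down
--   for j in range(len(template[0])):
--     line = ''.join([template[i][j] for i in range(len(template))])
--     words = line.split(' ')
--     for w in words:
--       if len(w) != 0:
--         wordLengths.append(len(w))
--
--   return wordLengths
-- ===== SOURCE B (Python) =====
-- def getWordLengths(template):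
--   out = []
--
--   def scan(chars):
--     run = 0
--     for c in chars:
--       if c == ' ':
--         if run != 0:
--           out.append(run)
--         run = 0
--       else:
--         run += 1
--     if run != 0:
--       out.append(run)
--
--   for row in template:
--     scan(row)
--   for j in range(len(template[0])):
--     scan(row[j] for row in template)
--   return out
-- ===== Notes on version B (the rewrite author's own statement) =====
-- stated objective: alternative
-- what changed: B drops split(' ') and ''.join entirely and instead scans characters directly (rows, then a generator per column), keeping a running count of consecutive non-space characters and emitting it at each space or end of stream.
import Mathlib
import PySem

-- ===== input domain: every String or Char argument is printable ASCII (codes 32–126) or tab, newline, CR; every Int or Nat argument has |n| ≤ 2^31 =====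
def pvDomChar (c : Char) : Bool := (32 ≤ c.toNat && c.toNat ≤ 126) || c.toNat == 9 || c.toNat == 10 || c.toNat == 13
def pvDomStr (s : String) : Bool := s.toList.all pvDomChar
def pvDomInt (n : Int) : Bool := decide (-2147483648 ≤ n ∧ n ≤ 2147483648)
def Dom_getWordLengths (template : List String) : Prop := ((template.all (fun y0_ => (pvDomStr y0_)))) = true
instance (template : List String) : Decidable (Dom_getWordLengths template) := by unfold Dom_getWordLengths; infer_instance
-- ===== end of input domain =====

-- B replaces split/join per row and per column by a single run-length scan over the
-- characters (objective: alternative decomposition, no intermediate strings/lists of words).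


-- ===== PORT A =====
-- inner 'for w in words: if len(w) != 0: wordLengths.append(len(w))'
def pvWordsA (wl : List Int) (words : List (List Char)) : List Int :=
  words.foldl (fun acc w => if w.length ≠ 0 then acc ++ [(w.length : Int)] else acc) wl

-- template[0] is ported as headD "" and template[i][j] as pyGetD with default ' ';
-- Python raises there (empty template / too-short row), which Pre_ excludes.
def getWordLengths (template : List String) : List Int :=
  let wl : List Int := []
  -- across: for i in range(len(template)): line = template[i]
  let wl := template.foldl
    (fun wl line => pvWordsA wl (PySem.Chars.splitOn line.toList [' '])) wl
  -- down: for j in range(len(template[0])): line = ''.join([template[i][j] ...])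
  let wl := (List.range (template.headD "").toList.length).foldl
    (fun wl j =>
      let line := PySem.Chars.join []
        (template.map (fun s => [PySem.List.pyGetD s.toList (j : Int) ' ']))
      pvWordsA wl (PySem.Chars.splitOn line [' '])) wl
  wl

-- ===== PORT B =====
-- run-length scan: emit the current run at a space or at the end of the character stream
def pvScan (out : List Int) (run : Int) (cs : List Char) : List Int :=
  match cs with
  | [] => if run ≠ 0 then out ++ [run] else out
  | c :: rest =>
      if c = ' ' then pvScan (if run ≠ 0 then out ++ [run] else out) 0 rest
      else pvScan out (run + 1) rest

def getWordLengths_alt (template : List String) : List Int :=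
  let out := template.foldl (fun out row => pvScan out 0 row.toList) []
  (List.range (template.headD "").toList.length).foldl
    (fun out j => pvScan out 0 (template.map (fun row => PySem.List.pyGetD row.toList (j : Int) ' '))) out

-- ===== PRECONDITION & SPEC =====
-- Pre_ excludes exactly the inputs where Python A raises IndexError: an empty template
-- (template[0]) and templates whose first row is longer than some later row (template[i][j]).
def Pre_getWordLengths (template : List String) : Prop :=
  template ≠ [] ∧ ∀ s ∈ template, (template.headD "").toList.length ≤ s.toList.length
instance (template : List String) : Decidable (Pre_getWordLengths template) := by
  unfold Pre_getWordLengths; infer_instance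

def pvWitness_getWordLengths : List String := ["ab c", "a  b", "   z"]

def Spec_getWordLengths (template : List String) (out : List Int) : Prop := out = getWordLengths_alt template
instance (template : List String) (out : List Int) : Decidable (Spec_getWordLengths template out) := by unfold Spec_getWordLengths; infer_instance

-- ===== CLAIM (what is proved, stated in full; the proofs are below) =====
def Claim_equal_getWordLengths : Prop := ∀ (template : List String), Dom_getWordLengths template → Pre_getWordLengths template → Spec_getWordLengths template (getWordLengths template)

-- ===== LEMMAS AND PROOFS =====

-- simple structural form of str.split(' ') used to bridge the two ports
def pvSplit (pre : List Char) : List Char → List (List Char)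
  | [] => [pre]
  | c :: rest => if c = ' ' then pre :: pvSplit [] rest else pvSplit (pre ++ [c]) rest

theorem pvSplitOn_go_space (fuel : Nat) : ∀ (l cur : List Char) (acc : List (List Char)),
    l.length < fuel →
    PySem.Chars.splitOn.go [' '] fuel l cur acc = acc.reverse ++ pvSplit cur.reverse l := by
  induction fuel with
  | zero => intro l cur acc h; omega
  | succ fuel ih =>
    intro l cur acc h
    cases l with
    | nil => simp [PySem.Chars.splitOn.go, pvSplit]
    | cons c rest =>
      by_cases hc : c = ' '
      · have : List.isPrefixOf [' '] (c :: rest) = true := by simp [hc, List.isPrefixOf]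
        rw [PySem.Chars.splitOn.go, if_pos this]
        simp only [List.length_cons] at h
        rw [ih _ _ _ (by simpa using Nat.lt_of_succ_lt_succ h)]
        simp [pvSplit, hc]
      · have : List.isPrefixOf [' '] (c :: rest) = false := by
          simp [List.isPrefixOf, Ne.symm hc]
        rw [PySem.Chars.splitOn.go, if_neg (by simp [this])]
        simp only [List.length_cons] at h
        rw [ih _ _ _ (Nat.lt_of_succ_lt_succ h)]
        simp [pvSplit, hc]

theorem pvSplitOn_space (cs : List Char) :
    PySem.Chars.splitOn cs [' '] = pvSplit [] cs := by
  rw [PySem.Chars.splitOn, pvSplitOn_go_space (cs.length + 1) cs [] [] (by omega)]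
  simp

theorem pvScan_eq_wordsA : ∀ (cs pre : List Char) (wl : List Int),
    pvScan wl (pre.length : Int) cs = pvWordsA wl (pvSplit pre cs) := by
  intro cs
  induction cs with
  | nil =>
    intro pre wl
    by_cases h : pre.length = 0
    · simp [pvScan, pvSplit, pvWordsA, List.length_eq_zero_iff.mp h]
    · simp [pvScan, pvSplit, pvWordsA, h, show pre ≠ [] from fun hp => h (by simp [hp])]
  | cons c rest ih =>
    intro pre wl
    by_cases hc : c = ' '
    · have h0 := ih [] (if pre.length ≠ 0 then wl ++ [(pre.length : Int)] else wl)
      by_cases h : pre.length = 0 <;>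
        simp_all [pvScan, pvSplit, pvWordsA]
    · have h1 := ih (pre ++ [c]) wl
      simp only [List.length_append, List.length_singleton] at h1
      push_cast at h1
      simpa [pvScan, pvSplit, hc] using h1

theorem pvScan_eq_splitOn (cs : List Char) (wl : List Int) :
    pvScan wl 0 cs = pvWordsA wl (PySem.Chars.splitOn cs [' ']) := by
  rw [pvSplitOn_space]
  simpa using pvScan_eq_wordsA cs [] wl

-- ===== VERDICT (by name: the statement is the Claim_ definition above) =====
theorem getWordLengths_spec : Claim_equal_getWordLengths := by
  intro template _ _
  unfold Spec_getWordLengths getWordLengths getWordLengths_alt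
  have hstep : (fun (wl : List Int) (line : String) =>
      pvWordsA wl (PySem.Chars.splitOn line.toList [' '])) =
      (fun (out : List Int) (row : String) => pvScan out 0 row.toList) := by
    funext wl line; exact (pvScan_eq_splitOn line.toList wl).symm
  rw [hstep]
  have hcol : (fun (wl : List Int) (j : Int) =>
      pvWordsA wl (PySem.Chars.splitOn
        (PySem.Chars.join [] (template.map (fun s => [PySem.List.pyGetD s.toList j ' ']))) [' '])) =
      (fun (out : List Int) (j : Int) =>
        pvScan out 0 (template.map (fun row => PySem.List.pyGetD row.toList j ' '))) := by
    funext wl j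
    rw [show (template.map (fun s => [PySem.List.pyGetD s.toList j ' '])) =
        (template.map (fun s => PySem.List.pyGetD s.toList j ' ')).map (fun c => [c]) by
      simp [List.map_map]]
    rw [PySem.Chars.join_nil_singletons]
    exact (pvScan_eq_splitOn _ wl).symm
  rw [hcol]
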